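-- pv_equiv track=rewrite | github.com/ashmika-26/dataStructures_Practice | PatternSlidingWindow.py | length_longest_OnesArray
-- ===== SOURCE A (Python) =====
-- def length_longest_OnesArray(arr,k): #[0,1,1,0,0,0,1,1,0,1,1] , 2
--     max_length, window_start, max_Ones = 0, 0, 0
--
--     for end in range(len(arr)):
--         if arr[end] == 1:
--             max_Ones+=1
--
--         if (end-window_start +1 - max_Ones) > k:
--             if arr[window_start] == 1:
--                 max_Ones-=1
--             window_start+=1
--
--         max_length = max(max_length,end-window_start+1)
--     return max_length
-- ===== SOURCE B (Python) =====
-- def length_longest_OnesArray(arr, k):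
--     n = len(arr)
--     z = [i for i, v in enumerate(arr) if v != 1]
--     if k < 0:
--         return 0  # a negative flip budget admits no window at all
--     if len(z) <= k:
--         return n
--     pad = [-1] + z + [n]
--     return max(pad[j + k + 1] - pad[j] - 1 for j in range(len(z) - k + 1))
-- ===== Notes on version B (the rewrite author's own statement) =====
-- stated objective: alternative
-- what changed: Replaces A's per-element two-pointer sliding-window scan with an index-table decomposition: one scan collects the indices of the elements that are not 1, and a single pass over that padded index list (sentinels -1 and len(arr)) takes the maximum gap pad[j+k+1]-pad[j]-1 spanning k flip positions.
import Mathlib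
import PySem

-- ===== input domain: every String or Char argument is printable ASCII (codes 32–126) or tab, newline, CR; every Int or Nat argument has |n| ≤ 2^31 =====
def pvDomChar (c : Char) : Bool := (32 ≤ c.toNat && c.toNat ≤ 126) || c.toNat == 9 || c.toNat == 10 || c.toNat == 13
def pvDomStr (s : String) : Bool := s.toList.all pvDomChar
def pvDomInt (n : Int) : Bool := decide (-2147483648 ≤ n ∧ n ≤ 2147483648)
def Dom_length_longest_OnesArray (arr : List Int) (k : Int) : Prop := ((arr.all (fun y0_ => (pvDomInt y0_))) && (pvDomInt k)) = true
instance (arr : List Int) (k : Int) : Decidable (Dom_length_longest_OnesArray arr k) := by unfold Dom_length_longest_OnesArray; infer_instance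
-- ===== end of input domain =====

-- B replaces A's per-element two-pointer scan by a zero-index table with sentinels and one
-- pass over the gaps between flip positions (objective: alternative decomposition).

-- ===== PORT A =====
-- loop body of A's 'for end in range(len(arr))', state (max_length, window_start, max_Ones)
def pvStepA (arr : List Int) (k : Int) (st : Int × Int × Int) (e : Int) : Int × Int × Int :=
  let maxOnes := if PySem.List.pyGetD arr e 0 = 1 then st.2.2 + 1 else st.2.2
  let p :=
    if e - st.2.1 + 1 - maxOnes > k then
      (st.2.1 + 1, if PySem.List.pyGetD arr st.2.1 0 = 1 then maxOnes - 1 else maxOnes)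
    else (st.2.1, maxOnes)
  (max st.1 (e - p.1 + 1), p.1, p.2)

def length_longest_OnesArray (arr : List Int) (k : Int) : Int :=
  ((PySem.List.pyRange 0 (PySem.List.len arr) 1).foldl (pvStepA arr k) (0, 0, 0)).1

-- ===== PORT B =====
def length_longest_OnesArray_alt (arr : List Int) (k : Int) : Int :=
  let n : Int := PySem.List.len arr
  let z : List Int := ((PySem.List.enumerate arr).filter (fun p => p.2 != 1)).map (·.1)
  if k < 0 then 0
  else if PySem.List.len z ≤ k then n
  else
    let pad : List Int := [-1] ++ z ++ [n]
    (PySem.List.max?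
      ((PySem.List.pyRange 0 (PySem.List.len z - k + 1) 1).map
        (fun j => PySem.List.pyGetD pad (j + k + 1) 0 - PySem.List.pyGetD pad j 0 - 1))
      (fun x => x)).getD 0

-- ===== PRECONDITION & SPEC =====
def Spec_length_longest_OnesArray (arr : List Int) (k : Int) (out : Int) : Prop := out = length_longest_OnesArray_alt arr k
instance (arr : List Int) (k : Int) (out : Int) : Decidable (Spec_length_longest_OnesArray arr k out) := by unfold Spec_length_longest_OnesArray; infer_instance

-- ===== CLAIM (what is proved, stated in full; the proofs are below) =====
def Claim_equal_length_longest_OnesArray : Prop := ∀ (arr : List Int) (k : Int), Dom_length_longest_OnesArray arr k → Spec_length_longest_OnesArray arr k (length_longest_OnesArray arr k)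

-- ===== LEMMAS AND PROOFS =====

-- number of "zeros" (elements ≠ 1) in a list
def pvZC (l : List Int) : Nat := l.countP (fun x => x != 1)
-- the window arr[i : i+m]
def pvWin (arr : List Int) (i m : Nat) : List Int := (arr.drop i).take m
-- "some window of length m inside the first t elements has at most k zeros"
def pvOkB (arr : List Int) (k : Int) (t m : Nat) : Bool :=
  (List.range (t + 1)).any (fun i => decide (i + m ≤ t) && decide ((pvZC (pvWin arr i m) : Int) ≤ k))
-- length of the longest window with at most k zeros inside the first t elements
def pvW (arr : List Int) (k : Int) (t : Nat) : Nat :=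
  Nat.findGreatest (fun m => pvOkB arr k t m = true) t
-- zeros among the first t elements
def pvC (arr : List Int) (t : Nat) : Nat := pvZC (arr.take t)
-- indices of the zeros
def pvZ (arr : List Int) : List Nat := (List.range arr.length).filter (fun i => arr.getD i 0 != 1)

lemma pvOkB_iff (arr : List Int) (k : Int) (t m : Nat) :
    pvOkB arr k t m = true ↔ ∃ i, i + m ≤ t ∧ (pvZC (pvWin arr i m) : Int) ≤ k := by
  simp only [pvOkB, List.any_eq_true, List.mem_range, Bool.and_eq_true, decide_eq_true_eq]
  constructor
  · rintro ⟨i, _, h1, h2⟩; exact ⟨i, h1, h2⟩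
  · rintro ⟨i, h1, h2⟩; exact ⟨i, by omega, h1, h2⟩

lemma pvZC_append (l₁ l₂ : List Int) : pvZC (l₁ ++ l₂) = pvZC l₁ + pvZC l₂ := by
  simp [pvZC, List.countP_append]

lemma pvZC_cons (x : Int) (l : List Int) :
    pvZC (x :: l) = pvZC l + (if x ≠ 1 then 1 else 0) := by
  simp [pvZC, List.countP_cons]

lemma pvZC_singleton (x : Int) : pvZC [x] = (if x ≠ 1 then 1 else 0) := by
  simp [pvZC, List.countP_cons]

lemma pvWin_succ (arr : List Int) (s m : Nat) (h : s + m < arr.length) :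
    pvWin arr s (m + 1) = pvWin arr s m ++ [arr.getD (s + m) 0] := by
  unfold pvWin
  rw [List.take_add_one]
  congr 1
  rw [List.getElem?_drop, List.getElem?_eq_getElem h, List.getD_eq_getElem _ _ h]
  rfl

lemma pvWin_cons (arr : List Int) (s m : Nat) (h : s < arr.length) :
    pvWin arr s (m + 1) = arr.getD s 0 :: pvWin arr (s + 1) m := by
  unfold pvWin
  rw [List.drop_eq_getElem_cons h, List.getD_eq_getElem _ _ h, List.take_succ_cons]

lemma pvC_add (arr : List Int) (s t : Nat) (h : s ≤ t) :
    pvC arr t = pvC arr s + pvZC (pvWin arr s (t - s)) := by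
  unfold pvC
  conv_lhs => rw [show t = s + (t - s) by omega]
  rw [List.take_add, pvZC_append]
  rfl

lemma pvOk_mono_len (arr : List Int) (k : Int) (t m m' : Nat)
    (h : pvOkB arr k t m = true) (hm : m' ≤ m) : pvOkB arr k t m' = true := by
  rw [pvOkB_iff] at h ⊢
  obtain ⟨i, h1, h2⟩ := h
  refine ⟨i, by omega, ?_⟩
  have hsub : pvWin arr i m' = (pvWin arr i m).take m' := by
    unfold pvWin; rw [List.take_take, Nat.min_eq_left hm]
  have : pvZC (pvWin arr i m') ≤ pvZC (pvWin arr i m) := by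
    rw [hsub]; exact List.Sublist.countP_le (List.take_sublist _ _)
  omega

lemma pvOk_mono_t (arr : List Int) (k : Int) (t m : Nat)
    (h : pvOkB arr k t m = true) : pvOkB arr k (t + 1) m = true := by
  rw [pvOkB_iff] at h ⊢
  obtain ⟨i, h1, h2⟩ := h
  exact ⟨i, by omega, h2⟩

lemma pvW_le (arr : List Int) (k : Int) (t : Nat) : pvW arr k t ≤ t :=
  Nat.findGreatest_le t

lemma pvW_ok_of_pos (arr : List Int) (k : Int) (t : Nat) (h : 0 < pvW arr k t) :
    pvOkB arr k t (pvW arr k t) = true := by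
  unfold pvW at h ⊢
  obtain ⟨n0, _, hle, hP⟩ := (Nat.findGreatest_pos).mp h
  exact Nat.findGreatest_spec (P := fun m => pvOkB arr k t m = true) hle hP

lemma pvW_not_ok (arr : List Int) (k : Int) (t m : Nat)
    (h1 : pvW arr k t < m) (h2 : m ≤ t) : ¬ (pvOkB arr k t m = true) := by
  unfold pvW at h1
  exact Nat.findGreatest_is_greatest h1 h2

lemma pvW_succ_le (arr : List Int) (k : Int) (t : Nat) :
    pvW arr k (t + 1) ≤ pvW arr k t + 1 := by
  set m' := pvW arr k (t + 1) with hm'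
  rcases Nat.eq_zero_or_pos m' with h0 | hpos
  · omega
  · have hok : pvOkB arr k (t + 1) m' = true := pvW_ok_of_pos arr k (t + 1) hpos
    have hok' : pvOkB arr k t (m' - 1) = true := by
      rw [pvOkB_iff] at hok ⊢
      obtain ⟨i, h1, h2⟩ := hok
      refine ⟨i, by omega, ?_⟩
      have hsub : pvWin arr i (m' - 1) = (pvWin arr i m').take (m' - 1) := by
        unfold pvWin; rw [List.take_take, Nat.min_eq_left (by omega)]
      have : pvZC (pvWin arr i (m' - 1)) ≤ pvZC (pvWin arr i m') := by
        rw [hsub]; exact List.Sublist.countP_le (List.take_sublist _ _)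
      omega
    have h3 : m' - 1 ≤ pvW arr k t := by
      refine Nat.le_findGreatest ?_ hok'
      have := pvW_le arr k (t + 1)
      omega
    omega

lemma pvW_mono_t (arr : List Int) (k : Int) (t : Nat) :
    pvW arr k t ≤ pvW arr k (t + 1) := by
  rcases Nat.eq_zero_or_pos (pvW arr k t) with h0 | hpos
  · omega
  · exact Nat.le_findGreatest (by have := pvW_le arr k t; omega)
      (pvOk_mono_t arr k t _ (pvW_ok_of_pos arr k t hpos))

-- left endpoint of A's window after processing t elements
lemma pvW_succ_of_le (arr : List Int) (k : Int) (t : Nat) (_ht : t ≤ arr.length)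
    (hC : (pvZC (pvWin arr (t - pvW arr k t) (pvW arr k t + 1)) : Int) ≤ k) :
    pvW arr k (t + 1) = pvW arr k t + 1 := by
  have hle := pvW_le arr k t
  have h1 : pvW arr k t + 1 ≤ pvW arr k (t + 1) := by
    refine Nat.le_findGreatest (by omega) ?_
    rw [pvOkB_iff]
    exact ⟨t - pvW arr k t, by omega, hC⟩
  have h2 := pvW_succ_le arr k t
  omega

lemma pvW_succ_of_gt (arr : List Int) (k : Int) (t : Nat) (_ht : t ≤ arr.length)
    (hC : (pvZC (pvWin arr (t - pvW arr k t) (pvW arr k t + 1)) : Int) > k) :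
    pvW arr k (t + 1) = pvW arr k t := by
  set m := pvW arr k t with hm
  have hle := pvW_le arr k t
  have hmono := pvW_mono_t arr k t
  by_contra hne
  have hgt : m + 1 ≤ pvW arr k (t + 1) := by omega
  have hpos : 0 < pvW arr k (t + 1) := by omega
  have hok : pvOkB arr k (t + 1) (pvW arr k (t + 1)) = true := pvW_ok_of_pos arr k (t + 1) hpos
  have hok1 : pvOkB arr k (t + 1) (m + 1) = true := pvOk_mono_len arr k (t + 1) _ _ hok hgt
  rw [pvOkB_iff] at hok1
  obtain ⟨i, h1, h2⟩ := hok1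
  rcases Nat.lt_or_ge (i + (m + 1)) (t + 1) with hlt | hge
  · -- the witness window lies inside the first t elements: contradicts maximality of m
    have : pvOkB arr k t (m + 1) = true := by
      rw [pvOkB_iff]; exact ⟨i, by omega, h2⟩
    exact absurd this (pvW_not_ok arr k t (m + 1) (by omega) (by omega))
  · -- the witness window is exactly A's window arr[t-m : t+1]
    have : i = t - m := by omega
    subst this
    omega

-- ===== A-side: the fold state after t steps =====
def pvStateA (arr : List Int) (k : Int) (t : Nat) : Int × Int × Int :=
  ((List.range t).map (fun (j : Nat) => (j : Int))).foldl (pvStepA arr k) (0, 0, 0)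

lemma pvStateA_succ (arr : List Int) (k : Int) (t : Nat) :
    pvStateA arr k (t + 1) = pvStepA arr k (pvStateA arr k t) (t : Int) := by
  unfold pvStateA
  rw [List.range_succ, List.map_append, List.foldl_append]
  rfl

lemma pvInvA (arr : List Int) (k : Int) (t : Nat) (ht : t ≤ arr.length) :
    pvStateA arr k t =
      ((pvW arr k t : Int), ((t - pvW arr k t : Nat) : Int),
        ((pvW arr k t : Int) - (pvZC (pvWin arr (t - pvW arr k t) (pvW arr k t)) : Int))) := by
  induction t with
  | zero =>
    simp [pvStateA, pvW, pvWin, pvZC]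
  | succ t ih =>
    have ht' : t ≤ arr.length := by omega
    have htlt : t < arr.length := by omega
    rw [pvStateA_succ, ih ht']
    set m := pvW arr k t with hm
    have hle := pvW_le arr k t
    set s := t - m with hs
    have hsm : s + m = t := by omega
    -- the element read this step
    set x := arr.getD t 0 with hx
    have hwsucc : pvZC (pvWin arr s (m + 1)) = pvZC (pvWin arr s m) + (if x ≠ 1 then 1 else 0) := by
      rw [pvWin_succ arr s m (by omega)]
      rw [pvZC_append, pvZC_singleton, hsm]
    set zc := pvZC (pvWin arr s m) with hzc
    set zc1 := pvZC (pvWin arr s (m + 1)) with hzc1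
    unfold pvStepA
    simp only [PySem.List.pyGetD_natCast]
    have hscast : ((s : Nat) : Int) = (t : Int) - (m : Int) := by omega
    -- the updated max_Ones equals (m+1) - zc1
    have hmo : (if arr.getD t 0 = 1 then ((m : Int) - (zc : Int)) + 1 else ((m : Int) - (zc : Int)))
        = ((m : Int) + 1 - (zc1 : Int)) := by
      by_cases hx1 : x = 1
      · rw [if_pos (by rw [← hx]; exact hx1)]
        have : zc1 = zc := by rw [hwsucc, if_neg (not_not_intro hx1)]; omega
        omega
      · rw [if_neg (by rw [← hx]; exact hx1)]
        have : zc1 = zc + 1 := by rw [hwsucc, if_pos hx1]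
        omega
    -- the branch condition is "zc1 > k"
    have hcond : ((t : Int) - ((s : Nat) : Int) + 1 -
        (if arr.getD t 0 = 1 then ((m : Int) - (zc : Int)) + 1 else ((m : Int) - (zc : Int))) > k)
        ↔ ((zc1 : Int) > k) := by
      rw [hmo, hscast]; constructor <;> intro <;> omega
    by_cases hC : (zc1 : Int) > k
    · -- shrink: window start moves to s+1
      rw [if_pos (hcond.mpr hC)]
      have hW := pvW_succ_of_gt arr k t ht' hC
      have hslt : s < arr.length := by omega
      have hwcons : zc1 = (if arr.getD s 0 ≠ 1 then 1 else 0) + pvZC (pvWin arr (s + 1) m) := by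
        rw [hzc1, pvWin_cons arr s m hslt, pvZC_cons]; omega
      set zc' := pvZC (pvWin arr (s + 1) m) with hzc'
      have hmo' : (if arr.getD s 0 = 1 then ((m : Int) + 1 - (zc1 : Int)) - 1 else ((m : Int) + 1 - (zc1 : Int)))
          = ((m : Int) - (zc' : Int)) := by
        by_cases hxs : arr.getD s 0 = 1
        · rw [if_pos hxs]
          have : zc1 = zc' := by rw [hwcons, if_neg (not_not_intro hxs)]; omega
          omega
        · rw [if_neg hxs]
          have : zc1 = zc' + 1 := by rw [hwcons, if_pos hxs]; omega
          omega
      dsimp only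
      rw [hW]
      have hs'' : t + 1 - m = s + 1 := by omega
      rw [hs'']
      simp only [Prod.mk.injEq]
      refine ⟨?_, ?_, ?_⟩
      · rw [hscast]
        have he : (t : Int) - ((t : Int) - (m : Int) + 1) + 1 = (m : Int) := by ring
        rw [he, max_self]
      · push_cast; ring
      · rw [hmo, hmo']
    · -- grow: window start stays, length becomes m+1
      rw [if_neg (by rw [hcond]; exact hC)]
      have hW := pvW_succ_of_le arr k t ht' (not_lt.mp hC)
      dsimp only
      rw [hW]
      have hs'' : t + 1 - (pvW arr k t + 1) = s := by omega
      rw [hs'']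
      simp only [Prod.mk.injEq]
      refine ⟨?_, ?_, ?_⟩
      · rw [hscast]
        have he : (t : Int) - ((t : Int) - (m : Int)) + 1 = (m : Int) + 1 := by ring
        rw [he, max_eq_right (by omega)]
        push_cast; ring
      · trivial
      · rw [hmo, ← hzc1]; push_cast; ring

lemma pvA_eq_W (arr : List Int) (k : Int) :
    length_longest_OnesArray arr k = (pvW arr k arr.length : Int) := by
  unfold length_longest_OnesArray
  rw [PySem.List.len_eq, PySem.List.pyRange_one]
  have h1 : (((arr.length : Int)) - 0).toNat = arr.length := by omega
  rw [h1]
  have h2 : (List.range arr.length).map (fun (j : Nat) => (0 : Int) + (j : Int))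
      = (List.range arr.length).map (fun (j : Nat) => (j : Int)) := by
    simp
  rw [h2, show ((List.range arr.length).map (fun (j : Nat) => (j : Int))).foldl (pvStepA arr k) (0,0,0) = pvStateA arr k arr.length from rfl]
  rw [pvInvA arr k arr.length le_rfl]

-- ===== B-side =====

-- left/right edge of the maximal window whose zeros are the K zeros number jn .. jn+K-1
def pvLo (arr : List Int) (jn : Nat) : Nat :=
  if jn = 0 then 0 else (pvZ arr).getD (jn - 1) 0 + 1
def pvHi (arr : List Int) (K jn : Nat) : Nat :=
  if jn + K < (pvZ arr).length then (pvZ arr).getD (jn + K) 0 else arr.length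
def pvG (arr : List Int) (K jn : Nat) : Int := (pvHi arr K jn : Int) - (pvLo arr jn : Int)

lemma pvZ_pairwise (arr : List Int) : (pvZ arr).Pairwise (· < ·) :=
  List.Pairwise.sublist List.filter_sublist List.pairwise_lt_range

lemma mem_pvZ (arr : List Int) (i : Nat) :
    i ∈ pvZ arr ↔ i < arr.length ∧ arr.getD i 0 ≠ 1 := by
  simp [pvZ, List.mem_filter, List.mem_range]

lemma pvZ_lt_length (arr : List Int) (j : Nat) (hj : j < (pvZ arr).length) :
    (pvZ arr)[j] < arr.length :=
  ((mem_pvZ arr _).mp (List.getElem_mem hj)).1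

lemma pvC_eq (arr : List Int) (t : Nat) (ht : t ≤ arr.length) :
    pvC arr t = ((List.range t).filter (fun i => arr.getD i 0 != 1)).length := by
  induction t with
  | zero => simp [pvC, pvZC]
  | succ t ih =>
    have ht' : t ≤ arr.length := by omega
    have htlt : t < arr.length := by omega
    have h1 : pvWin arr t 1 = [arr.getD t 0] := by
      unfold pvWin
      rw [List.drop_eq_getElem_cons htlt, List.take_succ_cons, List.take_zero,
        List.getD_eq_getElem _ _ htlt]
    rw [pvC_add arr t (t + 1) (by omega), ih ht']
    simp only [Nat.add_sub_cancel_left, h1, pvZC_singleton]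
    rw [List.range_succ, List.filter_append, List.length_append]
    have h2 : (List.filter (fun i => arr.getD i 0 != 1) [t]).length
        = if arr.getD t 0 ≠ 1 then 1 else 0 := by
      simp only [List.filter_cons, List.filter_nil]
      by_cases hx : arr.getD t 0 = 1
      · rw [if_neg (by simp only [bne_iff_ne, ne_eq, not_not]; exact hx),
          if_neg (not_not_intro hx)]
        rfl
      · rw [if_pos (by simp only [bne_iff_ne, ne_eq]; exact hx), if_pos hx]
        rfl
    rw [h2]

lemma pvC_count (arr : List Int) (t : Nat) (ht : t ≤ arr.length) :
    pvC arr t = ((pvZ arr).filter (fun p => decide (p < t))).length := by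
  rw [pvC_eq arr t ht]
  congr 1
  unfold pvZ
  rw [List.filter_filter]
  conv_rhs => rw [show arr.length = t + (arr.length - t) by omega, List.range_add,
    List.filter_append]
  have h2 : (((List.range (arr.length - t)).map (fun x => t + x)).filter
      (fun a => decide (a < t) && (arr.getD a 0 != 1))) = [] := by
    rw [List.filter_eq_nil_iff]
    intro a ha
    obtain ⟨x, _, hx⟩ := List.mem_map.mp ha
    subst hx
    simp
  rw [h2, List.append_nil]
  apply List.filter_congr
  intro a ha
  have : a < t := List.mem_range.mp ha
  simp [this]

lemma pvC_top (arr : List Int) : pvC arr arr.length = (pvZ arr).length :=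
  pvC_eq arr arr.length le_rfl

lemma pvC_mono (arr : List Int) (s t : Nat) (h : s ≤ t) : pvC arr s ≤ pvC arr t := by
  rw [pvC_add arr s t h]; omega

lemma pvFilter_lt_getElem {l : List Nat} (hl : l.Pairwise (· < ·)) {j : Nat} (hj : j < l.length) :
    l.filter (fun p => decide (p < l[j])) = l.take j := by
  have hpw := List.pairwise_iff_getElem.mp hl
  obtain ⟨v, hv⟩ : ∃ v, l[j] = v := ⟨_, rfl⟩
  rw [hv]
  conv_lhs => rw [← List.take_append_drop j l]
  rw [List.filter_append]
  have h1 : (l.take j).filter (fun p => decide (p < v)) = l.take j := by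
    rw [List.filter_eq_self]
    intro a ha
    obtain ⟨i, hi, hia⟩ := List.mem_take_iff_getElem.mp ha
    subst hia
    have := hpw i j (by omega) hj (by omega)
    rw [hv] at this
    simpa using this
  have h2 : (l.drop j).filter (fun p => decide (p < v)) = [] := by
    rw [List.filter_eq_nil_iff]
    intro a ha
    obtain ⟨i, hi, hia⟩ := List.mem_drop_iff_getElem.mp ha
    subst hia
    rcases Nat.eq_zero_or_pos i with h0 | hpos
    · subst h0; simp [← hv]
    · have := hpw j (j + i) hj (by omega) (by omega)
      rw [hv] at this
      simp; omega
  rw [h1, h2, List.append_nil]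

lemma pvFilter_le_getElem {l : List Nat} (hl : l.Pairwise (· < ·)) {j : Nat} (hj : j < l.length) :
    l.filter (fun p => decide (p < l[j] + 1)) = l.take (j + 1) := by
  have hpw := List.pairwise_iff_getElem.mp hl
  obtain ⟨v, hv⟩ : ∃ v, l[j] = v := ⟨_, rfl⟩
  rw [hv]
  conv_lhs => rw [← List.take_append_drop (j + 1) l]
  rw [List.filter_append]
  have h1 : (l.take (j + 1)).filter (fun p => decide (p < v + 1)) = l.take (j + 1) := by
    rw [List.filter_eq_self]
    intro a ha
    obtain ⟨i, hi, hia⟩ := List.mem_take_iff_getElem.mp ha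
    subst hia
    rcases Nat.lt_or_ge i j with hij | hij
    · have := hpw i j (by omega) hj hij
      rw [hv] at this
      simp; omega
    · have : i = j := by omega
      subst this; simp [← hv]
  have h2 : (l.drop (j + 1)).filter (fun p => decide (p < v + 1)) = [] := by
    rw [List.filter_eq_nil_iff]
    intro a ha
    obtain ⟨i, hi, hia⟩ := List.mem_drop_iff_getElem.mp ha
    subst hia
    have := hpw j (j + 1 + i) hj (by omega) (by omega)
    rw [hv] at this
    simp; omega
  rw [h1, h2, List.append_nil]

lemma pvC_at_Z (arr : List Int) (j : Nat) (hj : j < (pvZ arr).length) :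
    pvC arr ((pvZ arr)[j]) = j := by
  have hlt := pvZ_lt_length arr j hj
  rw [pvC_count arr _ (by omega), pvFilter_lt_getElem (pvZ_pairwise arr) hj,
    List.length_take]
  omega

lemma pvC_after_Z (arr : List Int) (j : Nat) (hj : j < (pvZ arr).length) :
    pvC arr ((pvZ arr)[j] + 1) = j + 1 := by
  have hlt := pvZ_lt_length arr j hj
  rw [pvC_count arr _ (by omega), pvFilter_le_getElem (pvZ_pairwise arr) hj,
    List.length_take]
  omega

lemma pvZ_lt_of_lt_c (arr : List Int) (i j : Nat) (_hi : i ≤ arr.length)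
    (hj : j < (pvZ arr).length) (h : j < pvC arr i) : (pvZ arr)[j] < i := by
  by_contra hcon
  have h1 : pvC arr i ≤ pvC arr ((pvZ arr)[j]) := pvC_mono arr _ _ (by omega)
  rw [pvC_at_Z arr j hj] at h1
  omega

lemma le_pvZ_of_c_le (arr : List Int) (i j : Nat) (_hi : i ≤ arr.length)
    (hj : j < (pvZ arr).length) (h : pvC arr i ≤ j) : i ≤ (pvZ arr)[j] := by
  by_contra hcon
  have h1 : pvC arr ((pvZ arr)[j] + 1) ≤ pvC arr i := pvC_mono arr _ _ (by omega)
  rw [pvC_after_Z arr j hj] at h1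
  omega

lemma pvZ_port (arr : List Int) :
    ((PySem.List.enumerate arr).filter (fun p => p.2 != 1)).map (·.1)
      = (pvZ arr).map (fun (i : Nat) => (i : Int)) := by
  rw [PySem.List.enumerate_eq_map_pyRange arr 0, PySem.List.len_eq, PySem.List.pyRange_one]
  have h1 : ((arr.length : Int) - 0).toNat = arr.length := by omega
  rw [h1]
  simp only [List.filter_map, List.map_map, Function.comp_def]
  have h2 : List.filter (fun (x : Nat) => PySem.List.pyGetD arr (0 + (x : Int)) 0 != 1) (List.range arr.length)
      = List.filter (fun i => arr.getD i 0 != 1) (List.range arr.length) := by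
    apply List.filter_congr
    intro x hx
    simp
  rw [h2]
  apply List.map_congr_left
  intro a ha
  simp

lemma pad_getD (arr : List Int) (jn : Nat) :
    (((-1 : Int) :: ((pvZ arr).map (fun (i : Nat) => (i : Int)) ++ [(arr.length : Int)])).getD jn 0)
      = if jn = 0 then -1
        else if jn - 1 < (pvZ arr).length then ((pvZ arr).getD (jn - 1) 0 : Int)
        else if jn - 1 = (pvZ arr).length then (arr.length : Int) else 0 := by
  cases jn with
  | zero => simp
  | succ j =>
    simp only [List.getD_cons_succ, Nat.succ_ne_zero, if_false, Nat.add_sub_cancel]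
    rw [List.getD_eq_getElem?_getD]
    by_cases hj : j < (pvZ arr).length
    · rw [List.getElem?_append_left (by simpa using hj), List.getElem?_map,
        List.getElem?_eq_getElem hj]
      simp [hj]
    · rw [List.getElem?_append_right (by simpa using hj)]
      by_cases hje : j = (pvZ arr).length
      · subst hje
        simp
      · rw [if_neg hj, if_neg hje]
        have : j - ((pvZ arr).map (fun (i : Nat) => (i : Int))).length ≠ 0 := by
          simp only [List.length_map]; omega
        rw [show (([(arr.length : Int)])[j - ((pvZ arr).map (fun (i : Nat) => (i : Int))).length]?) = none from List.getElem?_eq_none (by simp; omega)]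
        rfl

lemma pvLo_le_pvHi (arr : List Int) (K jn : Nat) (hK : K < (pvZ arr).length)
    (hjn : jn ≤ (pvZ arr).length - K) : pvLo arr jn ≤ pvHi arr K jn := by
  unfold pvLo pvHi
  by_cases h0 : jn = 0
  · simp [h0]
  · rw [if_neg h0]
    have hj1 : jn - 1 < (pvZ arr).length := by omega
    rw [List.getD_eq_getElem _ _ hj1]
    by_cases hcase : jn + K < (pvZ arr).length
    · rw [if_pos hcase, List.getD_eq_getElem _ _ hcase]
      have := List.pairwise_iff_getElem.mp (pvZ_pairwise arr) (jn - 1) (jn + K) hj1 hcase (by omega)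
      omega
    · rw [if_neg hcase]
      have := pvZ_lt_length arr (jn - 1) hj1
      omega

lemma pvHi_le_len (arr : List Int) (K jn : Nat) : pvHi arr K jn ≤ arr.length := by
  unfold pvHi
  split_ifs with h
  · rw [List.getD_eq_getElem _ _ h]
    exact Nat.le_of_lt (pvZ_lt_length arr _ h)
  · exact le_rfl

lemma pvC_lo (arr : List Int) (K jn : Nat) (hK : K < (pvZ arr).length)
    (hjn : jn ≤ (pvZ arr).length - K) : pvC arr (pvLo arr jn) = jn := by
  unfold pvLo
  by_cases h0 : jn = 0
  · simp [h0, pvC, pvZC]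
  · rw [if_neg h0]
    have hj1 : jn - 1 < (pvZ arr).length := by omega
    rw [List.getD_eq_getElem _ _ hj1, pvC_after_Z arr (jn - 1) hj1]
    omega

lemma pvC_hi (arr : List Int) (K jn : Nat) (hK : K < (pvZ arr).length)
    (hjn : jn ≤ (pvZ arr).length - K) : pvC arr (pvHi arr K jn) = jn + K := by
  unfold pvHi
  by_cases hcase : jn + K < (pvZ arr).length
  · rw [if_pos hcase, List.getD_eq_getElem _ _ hcase, pvC_at_Z arr _ hcase]
  · rw [if_neg hcase, pvC_top]
    omega

lemma pvG_le_W (arr : List Int) (k : Int) (hk : 0 ≤ k) (hK : k.toNat < (pvZ arr).length)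
    (jn : Nat) (hjn : jn ≤ (pvZ arr).length - k.toNat) :
    pvG arr k.toNat jn ≤ (pvW arr k arr.length : Int) := by
  set K := k.toNat with hKdef
  have hkK : (K : Int) = k := Int.toNat_of_nonneg hk
  have hlohi := pvLo_le_pvHi arr K jn hK hjn
  have hhin := pvHi_le_len arr K jn
  have hzc : pvC arr (pvHi arr K jn) = pvC arr (pvLo arr jn) + pvZC (pvWin arr (pvLo arr jn) (pvHi arr K jn - pvLo arr jn)) :=
    pvC_add arr _ _ hlohi
  rw [pvC_lo arr K jn hK hjn, pvC_hi arr K jn hK hjn] at hzc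
  have hok : pvOkB arr k arr.length (pvHi arr K jn - pvLo arr jn) = true := by
    rw [pvOkB_iff]
    refine ⟨pvLo arr jn, by omega, ?_⟩
    have : pvZC (pvWin arr (pvLo arr jn) (pvHi arr K jn - pvLo arr jn)) = K := by omega
    rw [this, hkK]
  have hle : pvHi arr K jn - pvLo arr jn ≤ pvW arr k arr.length :=
    Nat.le_findGreatest (by omega) hok
  unfold pvG
  omega

lemma pvW_le_G (arr : List Int) (k : Int) (hk : 0 ≤ k) (hK : k.toNat < (pvZ arr).length) :
    ∃ jn, jn ≤ (pvZ arr).length - k.toNat ∧ (pvW arr k arr.length : Int) ≤ pvG arr k.toNat jn := by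
  set K := k.toNat with hKdef
  have hkK : (K : Int) = k := Int.toNat_of_nonneg hk
  generalize hm : pvW arr k arr.length = m
  rcases Nat.eq_zero_or_pos m with h0 | hpos
  · refine ⟨0, by omega, ?_⟩
    have := pvLo_le_pvHi arr K 0 hK (by omega)
    unfold pvG
    omega
  · have hok := pvW_ok_of_pos arr k arr.length (by rw [hm]; exact hpos)
    rw [hm, pvOkB_iff] at hok
    obtain ⟨i, him, hz⟩ := hok
    set j := min (pvC arr i) ((pvZ arr).length - K) with hj
    refine ⟨j, by omega, ?_⟩
    have hin : i ≤ arr.length := by omega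
    -- left edge
    have hlo : pvLo arr j ≤ i := by
      unfold pvLo
      by_cases hj0 : j = 0
      · simp [hj0]
      · rw [if_neg hj0]
        have hj1 : j - 1 < (pvZ arr).length := by omega
        have := pvZ_lt_of_lt_c arr i (j - 1) hin hj1 (by omega)
        rw [List.getD_eq_getElem _ _ hj1]
        omega
    -- right edge
    have hhi : i + m ≤ pvHi arr K j := by
      unfold pvHi
      by_cases hcase : j + K < (pvZ arr).length
      · rw [if_pos hcase]
        have hj_ci : j = pvC arr i := by
          rcases Nat.le_total (pvC arr i) ((pvZ arr).length - K) with h | h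
          · rw [hj, Nat.min_eq_left h]
          · exfalso
            rw [hj, Nat.min_eq_right h] at hcase
            omega
        have hmm : (i + m) - i = m := by omega
        have hcadd := pvC_add arr i (i + m) (by omega)
        rw [hmm] at hcadd
        have hzK : pvZC (pvWin arr i m) ≤ K := by omega
        have hcle : pvC arr (i + m) ≤ j + K := by omega
        have := le_pvZ_of_c_le arr (i + m) (j + K) (by omega) hcase hcle
        rw [List.getD_eq_getElem _ _ hcase]
        omega
      · rw [if_neg hcase]
        omega
    unfold pvG
    omega

lemma pvW_zero_of_neg (arr : List Int) (k : Int) (hneg : k < 0) (t : Nat) :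
    pvW arr k t = 0 := by
  unfold pvW
  rw [Nat.findGreatest_eq_zero_iff]
  intro mm _ _ hP
  rw [pvOkB_iff] at hP
  obtain ⟨i, _, hzc⟩ := hP
  have : (0 : Int) ≤ (pvZC (pvWin arr i mm) : Int) := by positivity
  omega

lemma pvB_eq_W (arr : List Int) (k : Int) :
    length_longest_OnesArray_alt arr k = (pvW arr k arr.length : Int) := by
  unfold length_longest_OnesArray_alt
  simp only [pvZ_port arr]
  by_cases hneg : k < 0
  · rw [if_pos hneg, pvW_zero_of_neg arr k hneg]
    rfl
  · rw [if_neg hneg]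
    have hk : 0 ≤ k := by omega
    set N := (pvZ arr).length with hN
    have hlen : PySem.List.len ((pvZ arr).map (fun (i : Nat) => (i : Int))) = (N : Int) := by
      rw [PySem.List.len_eq, List.length_map]
    rw [hlen]
    by_cases hfit : (N : Int) ≤ k
    · rw [if_pos hfit, PySem.List.len_eq]
      have hWn : pvW arr k arr.length = arr.length := by
        apply le_antisymm (pvW_le arr k arr.length)
        apply Nat.le_findGreatest le_rfl
        rw [pvOkB_iff]
        refine ⟨0, by omega, ?_⟩
        have h1 : pvWin arr 0 arr.length = arr := by
          simp [pvWin]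
        rw [h1]
        have h2 : pvZC arr = N := by
          have := pvC_top arr
          simpa [pvC, pvZC] using this
        rw [h2]
        exact hfit
      rw [hWn]
    · rw [if_neg hfit]
      set K := k.toNat with hKdef
      have hkK : (K : Int) = k := Int.toNat_of_nonneg hk
      have hKN : K < N := by omega
      have hrange : ((N : Int) - k + 1 - 0).toNat = N - K + 1 := by omega
      rw [PySem.List.pyRange_one, hrange]
      rw [List.map_map]
      have hmapeq : (List.range (N - K + 1)).map
          ((fun j => PySem.List.pyGetD ([(-1 : Int)] ++ (pvZ arr).map (fun (i : Nat) => (i : Int)) ++ [PySem.List.len arr]) (j + k + 1) 0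
            - PySem.List.pyGetD ([(-1 : Int)] ++ (pvZ arr).map (fun (i : Nat) => (i : Int)) ++ [PySem.List.len arr]) j 0 - 1) ∘ (fun (kk : Nat) => (0 : Int) + kk))
          = (List.range (N - K + 1)).map (pvG arr K) := by
        apply List.map_congr_left
        intro jn hjn
        have hjnb : jn ≤ N - K := by
          have := List.mem_range.mp hjn
          omega
        simp only [Function.comp_apply, zero_add, PySem.List.len_eq]
        have hcast : (jn : Int) + k + 1 = ((jn + K + 1 : Nat) : Int) := by
          push_cast
          omega
        rw [hcast, PySem.List.pyGetD_natCast, PySem.List.pyGetD_natCast]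
        rw [show ([(-1 : Int)] ++ (pvZ arr).map (fun (i : Nat) => (i : Int)) ++ [(arr.length : Int)])
            = ((-1 : Int) :: ((pvZ arr).map (fun (i : Nat) => (i : Int)) ++ [(arr.length : Int)])) from rfl]
        rw [pad_getD arr (jn + K + 1), pad_getD arr jn]
        rw [if_neg (by omega)]
        unfold pvG pvHi pvLo
        by_cases hcase : jn + K < N
        · rw [if_pos (by omega : jn + K + 1 - 1 < (pvZ arr).length),
            if_pos (show jn + K < (pvZ arr).length from hcase)]
          have : jn + K + 1 - 1 = jn + K := by omega
          rw [this]
          by_cases hj0 : jn = 0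
          · rw [if_pos hj0, if_pos hj0]
            push_cast
            ring
          · rw [if_neg hj0, if_neg hj0, if_pos (by omega : jn - 1 < (pvZ arr).length)]
            push_cast
            ring
        · rw [if_neg (by omega : ¬ (jn + K + 1 - 1 < (pvZ arr).length)),
            if_pos (by omega : jn + K + 1 - 1 = (pvZ arr).length),
            if_neg (show ¬ (jn + K < (pvZ arr).length) from hcase)]
          by_cases hj0 : jn = 0
          · rw [if_pos hj0, if_pos hj0]
            push_cast
            ring
          · rw [if_neg hj0, if_neg hj0, if_pos (by omega : jn - 1 < (pvZ arr).length)]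
            push_cast
            ring
      rw [hmapeq]
      obtain ⟨mv, hmv⟩ : ∃ mv, PySem.List.max? ((List.range (N - K + 1)).map (pvG arr K)) (fun x => x) = some mv := by
        cases h : PySem.List.max? ((List.range (N - K + 1)).map (pvG arr K)) (fun x => x) with
        | none =>
          rw [PySem.List.max?_eq_none_iff] at h
          rw [List.range_succ_eq_map] at h
          simp at h
        | some mv => exact ⟨mv, rfl⟩
      rw [hmv]
      have h1 : mv ≤ (pvW arr k arr.length : Int) := by
        obtain ⟨jn, hjn, hjv⟩ := List.mem_map.mp (PySem.List.max?_mem hmv)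
        subst hjv
        exact pvG_le_W arr k hk (by omega) jn (by have := List.mem_range.mp hjn; omega)
      have h2 : (pvW arr k arr.length : Int) ≤ mv := by
        obtain ⟨jn, hjn, hle⟩ := pvW_le_G arr k hk (by omega)
        refine le_trans hle ?_
        exact PySem.List.max?_isMax hmv _ (List.mem_map.mpr ⟨jn, List.mem_range.mpr (by omega), rfl⟩)
      simp only [Option.getD_some]
      omega

-- ===== VERDICT (by name: the statement is the Claim_ definition above) =====
theorem length_longest_OnesArray_spec : Claim_equal_length_longest_OnesArray := by
  intro arr k _
  unfold Spec_length_longest_OnesArray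
  rw [pvA_eq_W, pvB_eq_W]
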